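-- pv_equiv track=rewrite | github.com/qzhfx-git/github-repo | beys-text/1.py | get_text_features
-- ===== SOURCE A (Python) =====
-- def get_text_features(train_data_list, test_data_list, feature_words):
--     """
--     将训练数据和测试数据转换为特征向量。
--
--     参数:
--     train_data_list (list): 训练数据列表。
--     test_data_list (list): 测试数据列表。
--     feature_words (list): 特征词列表。
--
--     返回:
--     tuple: 包含训练特征向量列表和测试特征向量列表的元组。
--     """
--     def text_features(text, feature_words):
--         """
--         将文本转换为特征向量。
--
--         参数:
--         text (list): 分词后的文本。
--         feature_words (list): 特征词列表。
--
--         返回: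
--         list: 特征向量。
--         """
--         text_words = set(text)
--         features = [1 if word in text_words else 0 for word in feature_words]
--         return features
--
--     train_features_list = [text_features(text, feature_words) for text in train_data_list]
--     test_features_list = [text_features(text, feature_words) for text in test_data_list]
--     return train_features_list, test_features_list
-- ===== SOURCE B (Python) =====
-- def get_text_features(train_data_list, test_data_list, feature_words):
--     # Inverted index: feature word -> all positions it occupies in feature_words.
--     index = {}
--     for i, w in enumerate(feature_words):
--         index[w] = index.get(w, []) + [i]
--     n = len(feature_words)
--
--     def text_features(text):
--         v = [0] * n
--         for w in text:
--             for i in index.get(w, []):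
--                 v[i] = 1
--         return v
--
--     train_features_list = [text_features(text) for text in train_data_list]
--     test_features_list = [text_features(text) for text in test_data_list]
--     return train_features_list, test_features_list
-- ===== Notes on version B (the rewrite author's own statement) =====
-- stated objective: alternative
-- what changed: Builds an inverted index (feature word -> its positions) once, then for each text scans the text's words and sets 1 at the indexed positions of a zero vector, instead of scanning every feature word per text.
import Mathlib
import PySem

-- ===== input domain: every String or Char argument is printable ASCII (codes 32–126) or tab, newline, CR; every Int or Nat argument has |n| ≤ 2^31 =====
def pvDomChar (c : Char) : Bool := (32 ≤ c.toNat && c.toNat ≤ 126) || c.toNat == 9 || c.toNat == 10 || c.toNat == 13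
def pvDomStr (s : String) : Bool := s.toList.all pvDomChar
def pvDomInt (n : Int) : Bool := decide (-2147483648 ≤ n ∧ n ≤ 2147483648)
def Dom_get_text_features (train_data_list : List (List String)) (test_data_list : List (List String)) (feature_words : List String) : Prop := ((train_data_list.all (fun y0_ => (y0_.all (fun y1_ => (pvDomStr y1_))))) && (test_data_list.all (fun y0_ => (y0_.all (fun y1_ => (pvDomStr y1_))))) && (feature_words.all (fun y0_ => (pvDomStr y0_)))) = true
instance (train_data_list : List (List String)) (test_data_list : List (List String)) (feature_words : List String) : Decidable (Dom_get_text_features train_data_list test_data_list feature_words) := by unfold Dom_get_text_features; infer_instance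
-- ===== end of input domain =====

-- B builds an inverted index (feature word -> positions) once and fills a zero vector
-- per text from the text's words, instead of scanning all feature words per text (objective: alternative).


-- ===== PORT A =====
-- inner helper text_features: text_words = set(text); [1 if word in text_words else 0 for word in feature_words]
def gtfA_text_features (text : List String) (feature_words : List String) : List Int :=
  let text_words : PySem.Set String := PySem.Set.ofList text
  feature_words.map (fun word => if PySem.Set.contains text_words word then 1 else 0)

def get_text_features (train_data_list : List (List String)) (test_data_list : List (List String)) (feature_words : List String) : List (List Int) × List (List Int) :=
  let train_features_list := train_data_list.map (fun text => gtfA_text_features text feature_words)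
  let test_features_list := test_data_list.map (fun text => gtfA_text_features text feature_words)
  (train_features_list, test_features_list)

-- ===== PORT B =====
-- index = {}; for i, w in enumerate(feature_words): index[w] = index.get(w, []) + [i]
def gtfB_index (feature_words : List String) : PySem.Dict String (List Int) :=
  (PySem.List.enumerate feature_words).foldl
    (fun d p => d.insert p.2 (d.getD p.2 [] ++ [p.1])) PySem.Dict.empty

-- v = [0]*n; for w in text: for i in index.get(w, []): v[i] = 1   (v[i]=1 ported as pySetD, exact)
def gtfB_text_features (index : PySem.Dict String (List Int)) (n : Nat) (text : List String) : List Int :=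
  text.foldl (fun v w => (index.getD w []).foldl (fun v i => PySem.List.pySetD v i 1) v)
    (List.replicate n 0)

def get_text_features_alt (train_data_list : List (List String)) (test_data_list : List (List String)) (feature_words : List String) : List (List Int) × List (List Int) :=
  let index := gtfB_index feature_words
  let n := feature_words.length
  let train_features_list := train_data_list.map (fun text => gtfB_text_features index n text)
  let test_features_list := test_data_list.map (fun text => gtfB_text_features index n text)
  (train_features_list, test_features_list)

-- ===== PRECONDITION & SPEC =====
def Spec_get_text_features (train_data_list : List (List String)) (test_data_list : List (List String)) (feature_words : List String) (out : List (List Int) × List (List Int)) : Prop := out = get_text_features_alt train_data_list test_data_list feature_words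
instance (train_data_list : List (List String)) (test_data_list : List (List String)) (feature_words : List String) (out : List (List Int) × List (List Int)) : Decidable (Spec_get_text_features train_data_list test_data_list feature_words out) := by unfold Spec_get_text_features; infer_instance

-- ===== CLAIM (what is proved, stated in full; the proofs are below) =====
def Claim_equal_get_text_features : Prop := ∀ (train_data_list : List (List String)) (test_data_list : List (List String)) (feature_words : List String), Dom_get_text_features train_data_list test_data_list feature_words → Spec_get_text_features train_data_list test_data_list feature_words (get_text_features train_data_list test_data_list feature_words)

-- ===== LEMMAS AND PROOFS =====

-- the inverted-index fold, characterised over any starting dict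
lemma gtfB_index_foldl (l : List (Int × String)) (d : PySem.Dict String (List Int)) (w : String) :
    (l.foldl (fun d p => d.insert p.2 (d.getD p.2 [] ++ [p.1])) d).getD w []
      = d.getD w [] ++ (l.filter (fun p => p.2 == w)).map (·.1) := by
  induction l generalizing d with
  | nil => simp
  | cons p l ih =>
    simp only [List.foldl_cons, List.filter_cons, ih]
    by_cases h : p.2 = w
    · simp [h]
    · simp [PySem.Dict.getD_insert, h, Ne.symm h]

-- membership in an index entry = that position holds this feature word
lemma mem_gtfB_index (feature_words : List String) (w : String) (i : Int) :
    i ∈ (gtfB_index feature_words).getD w []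
      ↔ ∃ (k : Nat) (_ : k < feature_words.length), i = (k : Int) ∧ feature_words[k] = w := by
  unfold gtfB_index
  rw [gtfB_index_foldl]
  simp only [PySem.Dict.getD_empty, List.nil_append, List.mem_map, List.mem_filter,
    PySem.List.mem_enumerate_iff]
  constructor
  · rintro ⟨p, ⟨⟨k, hk, rfl⟩, hw⟩, rfl⟩
    exact ⟨k, hk, by simp, by simpa using hw⟩
  · rintro ⟨k, hk, rfl, hw⟩
    exact ⟨((k : Int), feature_words[k]), ⟨⟨k, hk, by simp⟩, by simpa using hw⟩, rfl⟩

-- inner loop: setting 1 at each listed (in-range, nonnegative) position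
lemma gtfB_inner_length (ps : List Int) (v : List Int) :
    (ps.foldl (fun v i => PySem.List.pySetD v i 1) v).length = v.length := by
  induction ps generalizing v with
  | nil => rfl
  | cons i ps ih => simp [ih, PySem.List.length_pySetD]

lemma gtfB_inner_get (ps : List Int) (v : List Int)
    (hps : ∀ i ∈ ps, 0 ≤ i ∧ i < (v.length : Int)) (j : Nat) :
    (ps.foldl (fun v i => PySem.List.pySetD v i 1) v)[j]?
      = if (j : Int) ∈ ps then (if j < v.length then some 1 else none) else v[j]? := by
  induction ps generalizing v with
  | nil => simp
  | cons i ps ih =>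
    have hi := hps i (by simp)
    simp only [List.foldl_cons, PySem.List.pySetD_of_nonneg _ _ hi.1]
    rw [ih _ (fun i' h' => by
      have := hps i' (by simp [h'])
      simpa using this)]
    simp only [List.length_set, List.getElem?_set, List.mem_cons]
    by_cases hji : (j : Int) = i
    · have hjt : i.toNat = j := by omega
      have hjlt : j < v.length := by omega
      simp [hji, hjt, hjlt]
    · have hjt : ¬ i.toNat = j := by omega
      simp [hji, hjt]

-- outer loop over the text's words
lemma gtfB_outer (index : PySem.Dict String (List Int)) (text : List String) (v : List Int)
    (hidx : ∀ w, ∀ i ∈ index.getD w [], 0 ≤ i ∧ i < (v.length : Int)) (j : Nat) :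
    (text.foldl (fun v w => (index.getD w []).foldl (fun v i => PySem.List.pySetD v i 1) v) v)[j]?
      = if ∃ w ∈ text, (j : Int) ∈ index.getD w []
        then (if j < v.length then some 1 else none) else v[j]? := by
  induction text generalizing v with
  | nil => simp
  | cons w text ih =>
    simp only [List.foldl_cons]
    have hlen : ((index.getD w []).foldl (fun v i => PySem.List.pySetD v i 1) v).length
        = v.length := gtfB_inner_length _ _
    rw [ih _ (fun w' i h => by rw [hlen]; exact hidx w' i h)]
    rw [gtfB_inner_get _ _ (hidx w) j, hlen]
    by_cases h1 : ∃ w' ∈ text, (j : Int) ∈ index.getD w' []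
    · simp [h1]
    · by_cases h2 : (j : Int) ∈ index.getD w []
      · simp [h1, h2]
      · simp [h1, h2]

-- per-text agreement of the two algorithms
lemma gtf_vec_eq (feature_words : List String) (text : List String) :
    gtfB_text_features (gtfB_index feature_words) feature_words.length text
      = gtfA_text_features text feature_words := by
  have hidx : ∀ w, ∀ i ∈ (gtfB_index feature_words).getD w [],
      0 ≤ i ∧ i < ((List.replicate feature_words.length (0 : Int)).length : Int) := by
    intro w i hi
    rcases (mem_gtfB_index feature_words w i).1 hi with ⟨k, hk, rfl, _⟩
    simp; omega
  apply List.ext_getElem?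
  intro j
  unfold gtfB_text_features gtfA_text_features
  rw [gtfB_outer _ _ _ hidx j]
  simp only [List.length_replicate, List.getElem?_map, List.getElem?_replicate]
  by_cases hj : j < feature_words.length
  · have hmem : (∃ w ∈ text, (j : Int) ∈ (gtfB_index feature_words).getD w [])
        ↔ feature_words[j] ∈ text := by
      constructor
      · rintro ⟨w, hw, hm⟩
        rcases (mem_gtfB_index feature_words w _).1 hm with ⟨k, hk, hkj, rfl⟩
        have : k = j := by omega
        subst this; exact hw
      · intro h
        exact ⟨feature_words[j], h, (mem_gtfB_index _ _ _).2 ⟨j, hj, rfl, rfl⟩⟩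
    rw [List.getElem?_eq_getElem hj]
    by_cases hc : feature_words[j] ∈ text
    · simp [hmem, hc, hj]
    · simp [hmem, hc, hj]
  · simp [hj]

-- ===== VERDICT (by name: the statement is the Claim_ definition above) =====
theorem get_text_features_spec : Claim_equal_get_text_features := by
  intro train test fw _
  unfold Spec_get_text_features get_text_features get_text_features_alt
  have h : ∀ t, gtfA_text_features t fw = gtfB_text_features (gtfB_index fw) fw.length t :=
    fun t => (gtf_vec_eq fw t).symm
  simp only [h]
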